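-- pv_equiv track=rewrite | github.com/sanedj/exercices-inf1007 | ch05_3/exercice.py | get_word_length_histogram
-- ===== SOURCE A (Python) =====
-- def get_num_letters(text):
-- 	new_text = ""
-- 	if text.isalnum():
-- 		nombre = len(text)
-- 	else:
-- 		for charac in text:
-- 			if charac.isalnum():
-- 				new_text = new_text + charac
-- 				continue
-- 			if not charac.isalnum():
-- 				continue
-- 		nombre = len(new_text)
-- 	return nombre
--
-- def get_word_length_histogram(text):
-- 	histogramme = [0]
-- 	for mot in text.split():
-- 		longueur = get_num_letters(mot)
-- 		if longueur >= len(histogramme):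
-- 			histogramme += [0] * (longueur - len(histogramme) + 1)
-- 		histogramme[longueur] += int(longueur != 0)
-- 	return histogramme
-- ===== SOURCE B (Python) =====
-- def get_num_letters(text):
--     return sum(c.isalnum() for c in text)
--
-- def get_word_length_histogram(text):
--     lengths = [get_num_letters(w) for w in text.split()]
--     maxlen = max((n for n in lengths if n > 0), default=0)
--     return [0] + [lengths.count(n) for n in range(1, maxlen + 1)]
-- ===== Notes on version B (the rewrite author's own statement) =====
-- stated objective: simpler
-- what changed: A grows the histogram list in place inside one loop (extending with zero padding and bumping hist[length] word by word); B is a two-pass count-then-allocate decomposition: it first computes the per-word alphanumeric counts, then allocates the [0..maxlen] table directly from the max positive count and fills bucket n with lengths.count(n).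
import Mathlib
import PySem

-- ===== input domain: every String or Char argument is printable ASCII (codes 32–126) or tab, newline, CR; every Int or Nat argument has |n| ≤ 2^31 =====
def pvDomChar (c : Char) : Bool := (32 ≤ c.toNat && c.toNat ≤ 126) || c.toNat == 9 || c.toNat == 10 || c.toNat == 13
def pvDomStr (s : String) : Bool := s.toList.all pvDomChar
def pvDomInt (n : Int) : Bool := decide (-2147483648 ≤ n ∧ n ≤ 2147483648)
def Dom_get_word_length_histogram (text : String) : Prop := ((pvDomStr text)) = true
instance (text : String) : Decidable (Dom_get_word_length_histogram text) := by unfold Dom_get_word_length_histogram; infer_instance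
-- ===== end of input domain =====

-- B replaces A's grow-the-list-in-place loop by a count-then-allocate decomposition (per-word alnum counts, then one table of counts per length); objective: simpler.

-- ===== PORT A =====
def get_num_letters (text : String) : Int :=
  if PySem.Str.strIsalnum text then PySem.Str.len text
  else
    let new_text : List Char := text.toList.foldl
      (fun acc charac => if PySem.Chars.isalnum charac then acc ++ [charac] else acc) []
    (new_text.length : Int)

-- body of A's loop, with 'longueur = get_num_letters(mot)' already computed
def pvHistStep (histogramme : List Int) (longueur : Int) : List Int :=
  let h := if longueur ≥ (histogramme.length : Int)
      then histogramme ++ List.replicate (longueur - (histogramme.length : Int) + 1).toNat (0 : Int)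
      else histogramme
  PySem.List.pySetD h longueur (PySem.List.pyGetD h longueur 0 + (if longueur ≠ 0 then (1 : Int) else 0))

def get_word_length_histogram (text : String) : List Int :=
  (PySem.Str.split₀ text).foldl (fun histogramme mot => pvHistStep histogramme (get_num_letters mot)) [0]

-- ===== PORT B =====
def get_num_letters_alt (text : String) : Int :=
  (text.toList.map (fun c => if PySem.Chars.isalnum c then (1 : Int) else 0)).sum

def get_word_length_histogram_alt (text : String) : List Int :=
  let lengths := (PySem.Str.split₀ text).map get_num_letters_alt
  let maxlen := PySem.List.maxD (lengths.filter (fun n => decide (0 < n))) (fun x => x) 0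
  [0] ++ (PySem.List.pyRange 1 (maxlen + 1) 1).map (fun n => (lengths.count n : Int))

-- ===== PRECONDITION & SPEC =====
def Spec_get_word_length_histogram (text : String) (out : List Int) : Prop := out = get_word_length_histogram_alt text
instance (text : String) (out : List Int) : Decidable (Spec_get_word_length_histogram text out) := by unfold Spec_get_word_length_histogram; infer_instance

-- ===== CLAIM (what is proved, stated in full; the proofs are below) =====
def Claim_equal_get_word_length_histogram : Prop := ∀ (text : String), Dom_get_word_length_histogram text → Spec_get_word_length_histogram text (get_word_length_histogram text)

-- ===== LEMMAS AND PROOFS =====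

-- running max of the .toNat of the word lengths (all lengths are ≥ 0)
def pvMaxNat (ns : List Int) : Nat := ns.foldl (fun a n => max a n.toNat) 0

-- the common reference histogram: length pvMaxNat+1, bucket 0 pinned to 0, bucket i the count of i
def pvHist (ns : List Int) : List Int :=
  (List.range (pvMaxNat ns + 1)).map (fun i : Nat => if i = 0 then (0 : Int) else (ns.count (i : Int) : Int))

theorem pvFoldlMax_le (ns : List Int) (a b : Nat) (ha : a ≤ b) (h : ∀ n ∈ ns, n.toNat ≤ b) :
    ns.foldl (fun acc n => max acc n.toNat) a ≤ b := by
  induction ns generalizing a with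
  | nil => simpa using ha
  | cons x t ih =>
    simp only [List.foldl_cons]
    exact ih _ (max_le ha (h x (by simp))) (fun n hn => h n (by simp [hn]))

theorem pvMaxNat_le (ns : List Int) (b : Nat) (h : ∀ n ∈ ns, n.toNat ≤ b) : pvMaxNat ns ≤ b :=
  pvFoldlMax_le ns 0 b (Nat.zero_le _) h

theorem le_pvMaxNat (ns : List Int) : ∀ n ∈ ns, n.toNat ≤ pvMaxNat ns :=
  (PySem.List.le_foldl_max_nat ns Int.toNat 0).2

theorem get_num_letters_eq (s : String) :
    get_num_letters s = ((s.toList.countP PySem.Chars.isalnum : Nat) : Int) := by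
  unfold get_num_letters
  by_cases hs : PySem.Str.strIsalnum s = true
  · rw [if_pos hs, PySem.Str.len_eq]
    rw [PySem.Str.strIsalnum_eq] at hs
    simp only [PySem.Chars.strIsalnum, Bool.and_eq_true, List.all_eq_true] at hs
    norm_cast
    exact ((List.countP_eq_length).2 (fun a ha => hs.2 a ha)).symm
  · rw [if_neg hs]
    simp only [PySem.List.foldl_append_if_eq_filter, List.nil_append,
      List.countP_eq_length_filter]

theorem get_num_letters_alt_eq (s : String) :
    get_num_letters_alt s = ((s.toList.countP PySem.Chars.isalnum : Nat) : Int) := by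
  unfold get_num_letters_alt
  exact PySem.List.sum_map_ite_one_zero PySem.Chars.isalnum s.toList

theorem pvMaxNat_append (p : List Int) (n : Int) :
    pvMaxNat (p ++ [n]) = max (pvMaxNat p) n.toNat := by
  simp [pvMaxNat, List.foldl_append]

theorem pvHist_length (p : List Int) : (pvHist p).length = pvMaxNat p + 1 := by
  simp [pvHist]

theorem pvHist_getElem (p : List Int) (i : Nat) (h : i < (pvHist p).length) :
    (pvHist p)[i] = if i = 0 then (0 : Int) else (p.count (i : Int) : Int) := by
  unfold pvHist at h ⊢
  rw [List.getElem_map, List.getElem_range]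

theorem pvCount_eq_zero_of_gt (p : List Int) (_hp : ∀ m ∈ p, 0 ≤ m) (i : Nat)
    (hi : pvMaxNat p < i) : p.count (i : Int) = 0 := by
  rw [List.count_eq_zero]
  intro hmem
  have h2 := le_pvMaxNat p _ hmem
  omega

theorem pvHistStep_pvHist (p : List Int) (n : Int) (hn : 0 ≤ n) (hp : ∀ m ∈ p, 0 ≤ m) :
    pvHistStep (pvHist p) n = pvHist (p ++ [n]) := by
  have hlen : (pvHist p).length = pvMaxNat p + 1 := pvHist_length p
  have hmaxapp : pvMaxNat (p ++ [n]) = max (pvMaxNat p) n.toNat := pvMaxNat_append p n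
  unfold pvHistStep
  by_cases hbig : n ≥ ((pvHist p).length : Int)
  · -- the list is extended, then bucket n (a fresh zero) is set to 1
    rw [hlen] at hbig
    have hn1 : (pvMaxNat p : Int) + 1 ≤ n := by push_cast at hbig; omega
    rw [if_pos (by rw [hlen]; push_cast; omega),
        PySem.List.pySetD_of_nonneg _ _ hn, PySem.List.pyGetD_of_nonneg _ _ hn]
    have hrep : (n - ((pvHist p).length : Int) + 1).toNat = n.toNat - pvMaxNat p := by
      rw [hlen]; omega
    rw [hrep]
    have hhlen : (pvHist p ++ List.replicate (n.toNat - pvMaxNat p) (0 : Int)).length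
        = n.toNat + 1 := by simp [hlen]; omega
    have hget : (pvHist p ++ List.replicate (n.toNat - pvMaxNat p) (0 : Int)).getD n.toNat 0
        = 0 := by
      rw [List.getD_eq_getElem _ _ (by rw [hhlen]; omega)]
      rw [List.getElem_append, dif_neg (by rw [hlen]; omega)]
      simp
    rw [hget, if_pos (by omega : n ≠ 0)]
    apply List.ext_getElem
    · simp only [List.length_set, hhlen, pvHist_length, hmaxapp]; omega
    · intro i h1 h2
      rw [pvHist_getElem _ _ h2, List.getElem_set]
      rw [List.length_set, hhlen] at h1
      by_cases hin : i = n.toNat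
      · rw [if_pos (by omega : n.toNat = i), if_neg (by omega : ¬ i = 0)]
        rw [List.count_append, pvCount_eq_zero_of_gt p hp i (by omega)]
        rw [List.count_singleton', if_pos (by omega : n = (i : Int))]
        norm_num
      · rw [if_neg (by omega : ¬ n.toNat = i), List.getElem_append]
        have hcnt : (p ++ [n]).count (i : Int) = p.count (i : Int) := by
          rw [List.count_append, List.count_singleton', if_neg (by omega : ¬ n = (i : Int))]
          omega
        rw [hcnt]
        by_cases hil : i < (pvHist p).length
        · rw [dif_pos hil, pvHist_getElem _ _ hil]
        · rw [dif_neg hil, List.getElem_replicate]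
          rw [hlen] at hil
          rw [if_neg (by omega : ¬ i = 0), pvCount_eq_zero_of_gt p hp i (by omega)]
          norm_num
  · -- the list is long enough already; bucket n is bumped by (n != 0)
    rw [hlen] at hbig
    have hn1 : n < (pvMaxNat p : Int) + 1 := by push_cast at hbig; omega
    rw [if_neg (by rw [hlen]; push_cast; omega),
        PySem.List.pySetD_of_nonneg _ _ hn, PySem.List.pyGetD_of_nonneg _ _ hn]
    have hget : (pvHist p).getD n.toNat 0
        = if n.toNat = 0 then (0 : Int) else (p.count ((n.toNat : Nat) : Int) : Int) := by
      rw [List.getD_eq_getElem _ _ (by rw [hlen]; omega)]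
      exact pvHist_getElem p n.toNat (by rw [hlen]; omega)
    rw [hget]
    apply List.ext_getElem
    · simp only [List.length_set, pvHist_length, hmaxapp]; omega
    · intro i h1 h2
      rw [pvHist_getElem _ _ h2, List.getElem_set]
      rw [List.length_set] at h1
      by_cases hin : n.toNat = i
      · rw [if_pos hin]
        rw [List.count_append, List.count_singleton']
        have hcast : ((n.toNat : Nat) : Int) = ((i : Nat) : Int) := by omega
        rw [hcast]
        split_ifs <;> push_cast <;> omega
      · rw [if_neg hin, pvHist_getElem _ _ h1]
        rw [List.count_append, List.count_singleton', if_neg (by omega : ¬ n = (i : Int))]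
        norm_num

theorem foldl_pvHistStep (ns p : List Int) (h : ∀ n ∈ ns, 0 ≤ n) (hp : ∀ m ∈ p, 0 ≤ m) :
    ns.foldl pvHistStep (pvHist p) = pvHist (p ++ ns) := by
  induction ns generalizing p with
  | nil => simp
  | cons x t ih =>
    rw [List.foldl_cons, pvHistStep_pvHist p x (h x (by simp)) hp]
    have hp' : ∀ m ∈ p ++ [x], 0 ≤ m := by
      intro q hq
      rcases List.mem_append.1 hq with h1 | h1
      · exact hp q h1
      · have hqx : q = x := by simpa using h1
        exact hqx ▸ h x (by simp)
    rw [ih (p ++ [x]) (fun n hn => h n (by simp [hn])) hp']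
    simp

theorem pvHist_nil : pvHist [] = [0] := by
  simp [pvHist, pvMaxNat]

theorem A_eq_pvHist (text : String) :
    get_word_length_histogram text
      = pvHist ((PySem.Str.split₀ text).map (fun w => ((w.toList.countP PySem.Chars.isalnum : Nat) : Int))) := by
  unfold get_word_length_histogram
  simp only [get_num_letters_eq]
  rw [← List.foldl_map, ← pvHist_nil]
  rw [foldl_pvHistStep _ [] (by intro n hn; simp at hn; obtain ⟨w, _, hw⟩ := hn; omega)
      (by simp)]
  simp

theorem maxD_filter_eq (ns : List Int) (_h : ∀ n ∈ ns, 0 ≤ n) :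
    PySem.List.maxD (ns.filter (fun n => decide (0 < n))) (fun x => x) 0 = (pvMaxNat ns : Int) := by
  unfold PySem.List.maxD
  rcases hm : PySem.List.max? (ns.filter (fun n => decide (0 < n))) (fun x => x) with _ | m
  · rw [PySem.List.max?_eq_none_iff] at hm
    have hz : ∀ n ∈ ns, n.toNat ≤ 0 := by
      intro n hn
      by_contra hc
      have hmem : n ∈ ns.filter (fun n => decide (0 < n)) := by
        rw [List.mem_filter]; exact ⟨hn, by simp; omega⟩
      rw [hm] at hmem; simp at hmem
    have := pvMaxNat_le ns 0 hz
    simp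
    omega
  · have hmem := PySem.List.max?_mem hm
    rw [List.mem_filter] at hmem
    have hmax := PySem.List.max?_isMax hm
    have h1 : m.toNat ≤ pvMaxNat ns := le_pvMaxNat ns m hmem.1
    have h2 : pvMaxNat ns ≤ m.toNat := by
      apply pvMaxNat_le
      intro n hn
      by_cases hpos : 0 < n
      · have := hmax n (by rw [List.mem_filter]; exact ⟨hn, by simp [hpos]⟩)
        omega
      · omega
    have hmpos : 0 < m := by simpa using hmem.2
    simp only [Option.getD_some]
    omega

theorem B_eq_pvHist (text : String) :
    get_word_length_histogram_alt text
      = pvHist ((PySem.Str.split₀ text).map (fun w => ((w.toList.countP PySem.Chars.isalnum : Nat) : Int))) := by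
  simp only [get_word_length_histogram_alt]
  rw [List.map_congr_left (fun w _ => get_num_letters_alt_eq w)]
  set ns := (PySem.Str.split₀ text).map (fun w => ((w.toList.countP PySem.Chars.isalnum : Nat) : Int)) with hns
  have hnn : ∀ n ∈ ns, 0 ≤ n := by
    intro n hn; rw [hns] at hn; simp at hn; obtain ⟨w, _, hw⟩ := hn; omega
  rw [maxD_filter_eq ns hnn, PySem.List.pyRange_one]
  have htn : ((pvMaxNat ns : Int) + 1 - 1).toNat = pvMaxNat ns := by omega
  rw [htn]
  unfold pvHist
  rw [List.range_succ_eq_map, List.map_cons, List.map_map, List.map_map, List.singleton_append]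
  congr 1
  simp
  intro a _
  have hc : (1 : Int) + (a : Nat) = ((a : Nat) : Int) + 1 := by omega
  rw [hc]

-- ===== VERDICT (by name: the statement is the Claim_ definition above) =====
theorem get_word_length_histogram_spec : Claim_equal_get_word_length_histogram := by
  intro text _
  unfold Spec_get_word_length_histogram
  rw [A_eq_pvHist, B_eq_pvHist]
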